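-- pv_equiv track=rewrite | github.com/tsreekrishna/library | crop_classification/src/utils.py | _generate_label_set_map
-- ===== SOURCE A (Python) =====
-- from typing import Dict, List
-- from itertools import combinations
--
-- def _generate_label_set_map(label_map: Dict[str, str]) -> Dict[str, str]:
--     set_map = {}
--     for i in range(1,len(label_map)+1):
--         for comb in combinations(label_map.keys(), i):
--             key_comb = ''
--             value_comb = ''
--             for items in comb:
--                 key_comb =  key_comb + ' ' + items
--                 value_comb =  value_comb + ' ' + label_map[items]
--             key_comb, value_comb = key_comb.lstrip(), value_comb.lstrip()
--             set_map[key_comb] = value_comb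
--     return set_map
-- ===== SOURCE B (Python) =====
-- def _generate_label_set_map(label_map):
--     # Incremental breadth-first power set: each size-(m+1) concatenation is built by
--     # extending a size-m one with an item from its remaining suffix, instead of
--     # regenerating every combination from scratch with itertools.
--     items = list(label_map.items())
--     level = [(k, v, items[i + 1:]) for i, (k, v) in enumerate(items)]
--     set_map = {}
--     for _ in range(len(items)):
--         next_level = []
--         for k, v, rest in level:
--             set_map[k.lstrip()] = v.lstrip()
--             next_level += [(k + ' ' + k2, v + ' ' + v2, rest[j + 1:])
--                            for j, (k2, v2) in enumerate(rest)]
--         level = next_level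
--     return set_map
-- ===== Notes on version B (the rewrite author's own statement) =====
-- stated objective: alternative
-- what changed: Replaces the per-size itertools.combinations regeneration (which rebuilds each combination's concatenated strings element by element with a dict lookup per element) by an incremental breadth-first pass that extends each previous level's already-joined partial concatenation with one item from its remaining suffix, emitting in the same (size, lexicographic) order.
import Mathlib
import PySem

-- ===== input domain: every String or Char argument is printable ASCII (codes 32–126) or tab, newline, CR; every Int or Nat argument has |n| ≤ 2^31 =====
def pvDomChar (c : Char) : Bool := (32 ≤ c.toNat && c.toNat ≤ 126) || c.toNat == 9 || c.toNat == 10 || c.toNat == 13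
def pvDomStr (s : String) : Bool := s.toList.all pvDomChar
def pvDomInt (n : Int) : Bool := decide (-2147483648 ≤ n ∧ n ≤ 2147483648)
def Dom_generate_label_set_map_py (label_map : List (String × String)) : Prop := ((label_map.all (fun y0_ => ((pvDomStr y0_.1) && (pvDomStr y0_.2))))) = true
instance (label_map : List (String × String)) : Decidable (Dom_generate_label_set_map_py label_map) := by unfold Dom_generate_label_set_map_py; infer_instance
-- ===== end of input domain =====

-- B replaces A's per-size itertools.combinations regeneration (which rebuilds every
-- combination's strings element by element) by an incremental breadth-first extension
-- of the previous level's already-joined strings (objective: alternative algorithm,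
-- same emission order; not measurably faster).

-- ===== PORT A =====
-- Literal port of A. 'label_map[items]' is ported as '(d.get? it).getD ""'; the
-- default is never used since every 'it' is a key of d (proved in the lemmas below).
-- 'range(1, len(label_map)+1)' is pyRange; 'i' is positive there, so 'i.toNat' is exact.
def generate_label_set_map_py (label_map : List (String × String)) : List (String × String) :=
  let d := PySem.Dict.ofList label_map
  ((PySem.List.pyRange 1 ((d.size : Int) + 1)).foldl (fun set_map i =>
      (PySem.List.combinations d.keys i.toNat).foldl (fun set_map comb =>
        let kv := comb.foldl (fun (kc : String × String) it =>
            (kc.1 ++ " " ++ it, kc.2 ++ " " ++ ((d.get? it).getD ""))) ("", "")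
        set_map.insert (PySem.Str.lstrip kv.1) (PySem.Str.lstrip kv.2))
      set_map)
    PySem.Dict.empty).items

-- ===== PORT B =====
-- '[(k, v, items[i+1:]) for i, (k, v) in enumerate(items)]': one pass pairing each
-- item with the suffix after it (items[i+1:] is exactly that suffix).
def pvSeeds : List (String × String) → List (String × String × List (String × String))
  | [] => []
  | (k, v) :: rest => (k, v, rest) :: pvSeeds rest

-- '[(k+' '+k2, v+' '+v2, rest[j+1:]) for j, (k2, v2) in enumerate(rest)]', same shape.
def pvExts (k v : String) : List (String × String) → List (String × String × List (String × String))
  | [] => []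
  | (k2, v2) :: rest => (k ++ " " ++ k2, v ++ " " ++ v2, rest) :: pvExts k v rest

def generate_label_set_map_py_alt (label_map : List (String × String)) : List (String × String) :=
  let items := (PySem.Dict.ofList label_map).items
  let st := (PySem.List.pyRange 0 (items.length : Int)).foldl
      (fun (st : PySem.Dict String String × List (String × String × List (String × String))) _ =>
        st.2.foldl
          (fun (st2 : PySem.Dict String String × List (String × String × List (String × String))) e =>
            (st2.1.insert (PySem.Str.lstrip e.1) (PySem.Str.lstrip e.2.1),
             st2.2 ++ pvExts e.1 e.2.1 e.2.2))
          (st.1, []))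
      (PySem.Dict.empty, pvSeeds items)
  st.1.items

-- ===== PRECONDITION & SPEC =====
def Spec_generate_label_set_map_py (label_map : List (String × String)) (out : List (String × String)) : Prop := out = generate_label_set_map_py_alt label_map
instance (label_map : List (String × String)) (out : List (String × String)) : Decidable (Spec_generate_label_set_map_py label_map out) := by unfold Spec_generate_label_set_map_py; infer_instance

-- ===== CLAIM (what is proved, stated in full; the proofs are below) =====
def Claim_equal_generate_label_set_map_py : Prop := ∀ (label_map : List (String × String)), Dom_generate_label_set_map_py label_map → Spec_generate_label_set_map_py label_map (generate_label_set_map_py label_map)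

-- ===== LEMMAS AND PROOFS =====

-- One concatenation step for a (key-string, value-string) pair.
def pvJoin (a q : String × String) : String × String := (a.1 ++ " " ++ q.1, a.2 ++ " " ++ q.2)

-- B-style joined strings of a combination (no leading separator).
def pvStr : List (String × String) → String × String
  | [] => ("", "")
  | q :: c => c.foldl pvJoin q

-- Size-r combinations together with the suffix of xs after their last element,
-- in CPython's combination order.
def pvCombsR : Nat → List (String × String) → List (List (String × String) × List (String × String))
  | 0, xs => [([], xs)]
  | _ + 1, [] => []
  | r + 1, p :: xs => ((pvCombsR r xs).map (fun t => (p :: t.1, t.2))) ++ pvCombsR (r + 1) xs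

-- One level of B's loop: each size-r combination as joined strings plus its suffix.
def pvLvl (r : Nat) (xs : List (String × String)) : List (String × String × List (String × String)) :=
  (pvCombsR r xs).map (fun t => ((pvStr t.1).1, (pvStr t.1).2, t.2))

-- The (key, value) pairs both programs write to the dict for size-r combinations.
def pvEmit (xs : List (String × String)) (r : Nat) : List (String × String) :=
  (PySem.List.combinations xs r).map
    (fun c => (PySem.Str.lstrip (pvStr c).1, PySem.Str.lstrip (pvStr c).2))

def pvIns (sm : PySem.Dict String String) (l : List (String × String)) : PySem.Dict String String :=
  l.foldl (fun sm p => sm.insert p.1 p.2) sm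

lemma pvCombsR_fst (r : Nat) (xs : List (String × String)) :
    (pvCombsR r xs).map (·.1) = PySem.List.combinations xs r := by
  induction xs generalizing r with
  | nil => cases r <;> simp [pvCombsR, PySem.List.combinations_zero, PySem.List.combinations_nil_succ]
  | cons p xs ih =>
    cases r with
    | zero => simp [pvCombsR, PySem.List.combinations_zero]
    | succ s =>
      simp only [pvCombsR, PySem.List.combinations_cons_succ, ← ih, List.map_map, List.map_append]
      rfl

lemma pvCombsR_len (r : Nat) (xs : List (String × String)) :
    ∀ t ∈ pvCombsR r xs, t.1.length = r := by
  induction xs generalizing r with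
  | nil => cases r <;> simp [pvCombsR]
  | cons p xs ih =>
    cases r with
    | zero => simp [pvCombsR]
    | succ s =>
      intro t ht
      simp [pvCombsR] at ht
      rcases ht with ⟨u, hu, hm, heq⟩ | ht
      · rw [← heq]; simp [ih s (u, hu) hm]
      · exact ih (s+1) t ht

lemma pvCombsR_succ (r : Nat) (xs : List (String × String)) :
    pvCombsR (r + 1) xs
      = (pvCombsR r xs).flatMap
          (fun t => (pvSeeds t.2).map (fun s => (t.1 ++ [(s.1, s.2.1)], s.2.2))) := by
  induction xs generalizing r with
  | nil => cases r <;> simp [pvCombsR, pvSeeds]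
  | cons p xs ih =>
    cases r with
    | zero =>
      simp only [pvCombsR, pvSeeds, List.flatMap_cons, List.flatMap_nil, List.map_cons,
        List.nil_append, List.append_nil, ih 0]
      simp
    | succ s =>
      simp only [pvCombsR, List.flatMap_append, List.map_flatMap, ih s, ih (s+1)]
      congr 1
      simp [List.flatMap_map, Function.comp_def]

lemma pvExts_eq (k v : String) (rest : List (String × String)) :
    pvExts k v rest
      = (pvSeeds rest).map (fun s => (k ++ " " ++ s.1, v ++ " " ++ s.2.1, s.2.2)) := by
  induction rest with
  | nil => rfl
  | cons p rest ih => cases p; simp [pvExts, pvSeeds, ih]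

lemma pvStr_concat (c : List (String × String)) (hc : c ≠ []) (q : String × String) :
    pvStr (c ++ [q]) = pvJoin (pvStr c) q := by
  cases c with
  | nil => exact absurd rfl hc
  | cons p c => simp [pvStr, List.foldl_append]

lemma pvLvl_one (xs : List (String × String)) : pvLvl 1 xs = pvSeeds xs := by
  rw [pvLvl, pvCombsR_succ 0 xs]
  simp only [pvCombsR, List.flatMap_cons, List.flatMap_nil, List.append_nil, List.map_map]
  conv_rhs => rw [← List.map_id (pvSeeds xs)]
  apply List.map_congr_left
  intro s _
  simp [pvStr]

lemma pvLvl_step (r : Nat) (xs : List (String × String)) :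
    (pvLvl (r + 1) xs).flatMap (fun e => pvExts e.1 e.2.1 e.2.2) = pvLvl (r + 2) xs := by
  rw [pvLvl, pvLvl, pvCombsR_succ (r+1) xs, List.flatMap_map, List.map_flatMap]
  refine List.flatMap_congr ?_
  intro t ht
  have hlen := pvCombsR_len (r+1) xs t ht
  have hne : t.1 ≠ [] := by intro h; rw [h] at hlen; simp at hlen
  rw [pvExts_eq, List.map_map]
  apply List.map_congr_left
  intro s _
  have := pvStr_concat t.1 hne (s.1, s.2.1)
  simp [pvJoin] at this
  simp [this]

lemma pvJoin_foldl_space (c : List (String × String)) (a b : String) :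
    c.foldl pvJoin (" " ++ a, " " ++ b)
      = (" " ++ (c.foldl pvJoin (a, b)).1, " " ++ (c.foldl pvJoin (a, b)).2) := by
  induction c generalizing a b with
  | nil => simp
  | cons q c ih => simp [pvJoin, ih, String.append_assoc]

lemma lstrip_space (s : String) : PySem.Str.lstrip (" " ++ s) = PySem.Str.lstrip s := by
  have h : (PySem.Str.lstrip (" " ++ s)).toList = (PySem.Str.lstrip s).toList := by
    rw [PySem.Str.toList_lstrip, PySem.Str.toList_lstrip]
    have h2 : (" " ++ s).toList = ' ' :: s.toList := by simp
    rw [h2]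
    simp [PySem.Chars.lstrip, PySem.Chars.isspace]
  exact String.toList_inj.mp h

lemma pvAfold (label_map : List (String × String)) (c : List (String × String))
    (hc : c ≠ []) (hsub : ∀ p ∈ c, p ∈ (PySem.Dict.ofList label_map).items) :
    (c.map (·.1)).foldl (fun (kc : String × String) it =>
        (kc.1 ++ " " ++ it, kc.2 ++ " " ++ (((PySem.Dict.ofList label_map).get? it).getD "")))
      ("", "")
      = (" " ++ (pvStr c).1, " " ++ (pvStr c).2) := by
  rw [List.foldl_map]
  have hcong : c.foldl (fun (kc : String × String) p =>
        (kc.1 ++ " " ++ p.1, kc.2 ++ " " ++ (((PySem.Dict.ofList label_map).get? p.1).getD "")))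
      ("", "") = c.foldl pvJoin ("", "") := by
    apply PySem.List.foldl_congr_mem
    intro acc p hp
    have := PySem.Dict.get?_of_mem_items (PySem.Dict.ofList label_map) (hsub p hp)
      (PySem.Dict.nodup_keys_ofList label_map)
    simp [pvJoin, this]
  rw [hcong]
  cases c with
  | nil => exact absurd rfl hc
  | cons q c =>
    simp only [List.foldl_cons, pvStr]
    have : pvJoin ("", "") q = (" " ++ q.1, " " ++ q.2) := by
      simp [pvJoin]
    rw [this, pvJoin_foldl_space]

lemma pvLvl_emit (r : Nat) (xs : List (String × String)) :
    (pvLvl (r + 1) xs).map (fun e => (PySem.Str.lstrip e.1, PySem.Str.lstrip e.2.1))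
      = pvEmit xs (r + 1) := by
  rw [pvLvl, pvEmit, ← pvCombsR_fst, List.map_map, List.map_map]
  rfl

lemma pvB_round (sm : PySem.Dict String String) (r : Nat) (xs : List (String × String)) :
    (pvLvl (r + 1) xs).foldl
        (fun (st2 : PySem.Dict String String × List (String × String × List (String × String))) e =>
          (st2.1.insert (PySem.Str.lstrip e.1) (PySem.Str.lstrip e.2.1),
           st2.2 ++ pvExts e.1 e.2.1 e.2.2))
        (sm, [])
      = (pvIns sm (pvEmit xs (r + 1)), pvLvl (r + 2) xs) := by
  rw [PySem.List.foldl_prod_mk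
        (f := fun sm (e : String × String × List (String × String)) =>
          PySem.Dict.insert sm (PySem.Str.lstrip e.1) (PySem.Str.lstrip e.2.1))
        (g := fun nl (e : String × String × List (String × String)) =>
          nl ++ pvExts e.1 e.2.1 e.2.2)]
  refine Prod.ext ?_ ?_
  · rw [← pvLvl_emit r xs, pvIns, List.foldl_map]
  · rw [PySem.List.foldl_append_eq_flatMap, pvLvl_step, List.nil_append]

lemma pvRange_one_map (n : Nat) :
    PySem.List.pyRange 1 ((n : Int) + 1) = List.map (fun (k : Nat) => (k : Int) + 1) (List.range n) := by
  induction n with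
  | zero => rfl
  | succ m ih =>
    have h : (1 : Int) ≤ (m : Int) + 1 := by omega
    have : ((m + 1 : Nat) : Int) + 1 = ((m : Int) + 1) + 1 := by push_cast; ring
    rw [this, PySem.List.pyRange_one_succ_right h, ih, List.range_succ]
    simp

lemma pvA_inner (label_map : List (String × String)) (r : Nat) (sm : PySem.Dict String String) :
    (PySem.List.combinations (PySem.Dict.ofList label_map).keys (r + 1)).foldl
        (fun set_map comb =>
          let kv := comb.foldl (fun (kc : String × String) it =>
              (kc.1 ++ " " ++ it, kc.2 ++ " " ++ (((PySem.Dict.ofList label_map).get? it).getD "")))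
            ("", "")
          set_map.insert (PySem.Str.lstrip kv.1) (PySem.Str.lstrip kv.2))
        sm
      = pvIns sm (pvEmit (PySem.Dict.ofList label_map).items (r + 1)) := by
  have hkeys : (PySem.Dict.ofList label_map).keys
      = (PySem.Dict.ofList label_map).items.map (·.1) := rfl
  rw [hkeys, PySem.List.combinations_map, List.foldl_map, pvIns, pvEmit, List.foldl_map]
  apply PySem.List.foldl_congr_mem
  intro acc c hc
  rw [PySem.List.mem_combinations_iff] at hc
  have hne : c ≠ [] := by
    intro h; rw [h] at hc; simp at hc
  have hsub : ∀ p ∈ c, p ∈ (PySem.Dict.ofList label_map).items :=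
    fun p hp => hc.1.mem hp
  simp only [pvAfold label_map c hne hsub, lstrip_space]

lemma pvB_loop (xs : List (String × String)) (m : Nat) :
    (List.range m).foldl
        (fun (st : PySem.Dict String String × List (String × String × List (String × String))) _ =>
          st.2.foldl
            (fun (st2 : PySem.Dict String String × List (String × String × List (String × String))) e =>
              (st2.1.insert (PySem.Str.lstrip e.1) (PySem.Str.lstrip e.2.1),
               st2.2 ++ pvExts e.1 e.2.1 e.2.2))
            (st.1, []))
        (PySem.Dict.empty, pvSeeds xs)
      = ((List.range m).foldl (fun sm k => pvIns sm (pvEmit xs (k + 1))) PySem.Dict.empty,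
         pvLvl (m + 1) xs) := by
  induction m with
  | zero => simp [pvLvl_one]
  | succ m ih =>
    rw [List.range_succ, List.foldl_append, List.foldl_append, ih]
    simp only [List.foldl_cons, List.foldl_nil]
    rw [pvB_round]

theorem pv_main_eq (label_map : List (String × String)) :
    generate_label_set_map_py label_map = generate_label_set_map_py_alt label_map := by
  unfold generate_label_set_map_py generate_label_set_map_py_alt
  simp only []
  set d := PySem.Dict.ofList label_map with hd
  set n := d.items.length with hn
  have hsize : (d.size : Int) = (n : Int) := rfl
  -- A side
  have hA : (PySem.List.pyRange 1 ((d.size : Int) + 1)).foldl (fun set_map i =>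
      (PySem.List.combinations d.keys i.toNat).foldl (fun set_map comb =>
        let kv := comb.foldl (fun (kc : String × String) it =>
            (kc.1 ++ " " ++ it, kc.2 ++ " " ++ ((d.get? it).getD ""))) ("", "")
        set_map.insert (PySem.Str.lstrip kv.1) (PySem.Str.lstrip kv.2))
      set_map)
    PySem.Dict.empty
    = (List.range n).foldl (fun sm k => pvIns sm (pvEmit d.items (k + 1))) PySem.Dict.empty := by
    rw [hsize, pvRange_one_map, List.foldl_map]
    apply PySem.List.foldl_congr_mem
    intro acc k _
    have htn : ((k : Int) + 1).toNat = k + 1 := by omega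
    rw [htn]
    exact pvA_inner label_map k acc
  -- B side
  have hB : (PySem.List.pyRange 0 ((n : Int))).foldl
      (fun (st : PySem.Dict String String × List (String × String × List (String × String))) _ =>
        st.2.foldl
          (fun (st2 : PySem.Dict String String × List (String × String × List (String × String))) e =>
            (st2.1.insert (PySem.Str.lstrip e.1) (PySem.Str.lstrip e.2.1),
             st2.2 ++ pvExts e.1 e.2.1 e.2.2))
          (st.1, []))
      (PySem.Dict.empty, pvSeeds d.items)
      = ((List.range n).foldl (fun sm k => pvIns sm (pvEmit d.items (k + 1))) PySem.Dict.empty,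
         pvLvl (n + 1) d.items) := by
    rw [PySem.List.pyRange_zero_natCast, List.foldl_map, pvB_loop]
  rw [hA, hB]

-- ===== VERDICT (by name: the statement is the Claim_ definition above) =====
theorem generate_label_set_map_py_spec : Claim_equal_generate_label_set_map_py := by
  intro label_map _
  unfold Spec_generate_label_set_map_py
  exact pv_main_eq label_map
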